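-- pv_equiv track=rewrite | github.com/TuMaTuck/Lab3 | Modul/gtrans.py | CodeLang
-- ===== SOURCE A (Python) =====
-- def CodeLang(lang: str) -> str:
--     """ Функція повертає код мови або назву мови. """
--     languages = {
--         "uk": "Ukrainian",
--         "en": "English",
--         "fr": "French",
--         "de": "German",
--         # Додайте більше мов за потреби
--     }
--     for code, name in languages.items():
--         if lang == code:
--             return name
--         if lang.lower() == name.lower():
--             return code
--     return "Language not found."
-- ===== SOURCE B (Python) =====
-- def _find(xs, x):
--     """Position of x in xs, or None."""
--     try:
--         return xs.index(x)
--     except ValueError: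
--         return None
--
--
-- def CodeLang(lang: str) -> str:
--     """ Функція повертає код мови або назву мови. """
--     codes = ["uk", "en", "fr", "de"]
--     names = ["Ukrainian", "English", "French", "German"]
--     i = _find(codes, lang)
--     if i is not None:
--         return names[i]
--     j = _find([n.lower() for n in names], lang.lower())
--     if j is not None:
--         return codes[j]
--     return "Language not found."
-- ===== Notes on version B (the rewrite author's own statement) =====
-- stated objective: alternative
-- what changed: Replaces the interleaved per-entry two-predicate scan over dict items by two parallel lists (codes, names) and positional index search: stage 1 searches the codes list and maps the found position into names, stage 2 searches the lowercased names list and maps the position back into codes.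
import Mathlib
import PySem

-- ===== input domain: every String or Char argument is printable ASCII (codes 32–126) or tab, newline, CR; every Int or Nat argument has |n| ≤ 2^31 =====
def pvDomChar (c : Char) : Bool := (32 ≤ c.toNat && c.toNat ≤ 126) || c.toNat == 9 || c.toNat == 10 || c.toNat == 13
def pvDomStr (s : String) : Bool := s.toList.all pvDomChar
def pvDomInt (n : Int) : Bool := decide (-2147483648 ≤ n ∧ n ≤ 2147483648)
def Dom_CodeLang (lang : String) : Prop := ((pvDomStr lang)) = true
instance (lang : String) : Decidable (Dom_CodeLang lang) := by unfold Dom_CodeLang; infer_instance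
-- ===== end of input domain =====

-- B replaces A's interleaved two-predicate scan over dict items by two parallel
-- lists and staged positional index searches (objective: alternative; same results).

-- ===== PORT A =====
-- A's loop over languages.items(), checking code then lowercased name at each entry.
def pvItemsA : List (String × String) :=
  [("uk", "Ukrainian"), ("en", "English"), ("fr", "French"), ("de", "German")]

def pvLoopA (lang : String) : List (String × String) → String
  | [] => "Language not found."
  | (code, name) :: rest =>
    if lang == code then name
    else if PySem.Str.lower lang == PySem.Str.lower name then code
    else pvLoopA lang rest

def CodeLang (lang : String) : String := pvLoopA lang pvItemsA

-- ===== PORT B =====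
def pvCodesB : List String := ["uk", "en", "fr", "de"]
def pvNamesB : List String := ["Ukrainian", "English", "French", "German"]

-- _find(xs, x): xs.index(x) caught to None = PySem.List.index?
def CodeLang_alt (lang : String) : String :=
  match PySem.List.index? pvCodesB lang with
  | some i =>
    -- names[i]: i comes from index?, hence in range; .getD is never the IndexError case
    (PySem.List.pyGet? pvNamesB (i : Int)).getD ""
  | none =>
    match PySem.List.index? (pvNamesB.map PySem.Str.lower) (PySem.Str.lower lang) with
    | some j => (PySem.List.pyGet? pvCodesB (j : Int)).getD ""
    | none => "Language not found."

-- ===== PRECONDITION & SPEC =====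
def Spec_CodeLang (lang : String) (out : String) : Prop := out = CodeLang_alt lang
instance (lang : String) (out : String) : Decidable (Spec_CodeLang lang out) := by unfold Spec_CodeLang; infer_instance

-- ===== CLAIM (what is proved, stated in full; the proofs are below) =====
def Claim_equal_CodeLang : Prop := ∀ (lang : String), Dom_CodeLang lang → Spec_CodeLang lang (CodeLang lang)

-- ===== LEMMAS AND PROOFS =====

-- ===== VERDICT (by name: the statement is the Claim_ definition above) =====
theorem CodeLang_spec : Claim_equal_CodeLang := by
  intro lang _
  unfold Spec_CodeLang CodeLang CodeLang_alt pvItemsA pvCodesB pvNamesB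
  by_cases h1 : lang = "uk"; · subst h1; decide
  by_cases h2 : lang = "en"; · subst h2; decide
  by_cases h3 : lang = "fr"; · subst h3; decide
  by_cases h4 : lang = "de"; · subst h4; decide
  have lu : PySem.Str.lower "Ukrainian" = "ukrainian" := by decide
  have le : PySem.Str.lower "English" = "english" := by decide
  have lf : PySem.Str.lower "French" = "french" := by decide
  have lg : PySem.Str.lower "German" = "german" := by decide
  have hc : PySem.List.index? ["uk", "en", "fr", "de"] lang = none := by
    rw [PySem.List.index?_eq_none_iff]; simp [h1, h2, h3, h4]
  have hmap : (["Ukrainian", "English", "French", "German"].map PySem.Str.lower)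
      = ["ukrainian", "english", "french", "german"] := by decide
  rw [hc, hmap]
  by_cases hu : PySem.Str.lower lang = "ukrainian"
  · rw [hu]; simp [pvLoopA, lu, h1, hu]; decide
  by_cases he : PySem.Str.lower lang = "english"
  · rw [he]; simp [pvLoopA, lu, le, h1, h2, he]; decide
  by_cases hf : PySem.Str.lower lang = "french"
  · rw [hf]; simp [pvLoopA, lu, le, lf, h1, h2, h3, hf]; decide
  by_cases hg : PySem.Str.lower lang = "german"
  · rw [hg]; simp [pvLoopA, lu, le, lf, lg, h1, h2, h3, h4, hg]; decide
  have hn : PySem.List.index? ["ukrainian", "english", "french", "german"]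
      (PySem.Str.lower lang) = none := by
    rw [PySem.List.index?_eq_none_iff]; simp [hu, he, hf, hg]
  rw [hn]
  simp [pvLoopA, lu, le, lf, lg, h1, h2, h3, h4, hu, he, hf, hg]
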